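-- pv_equiv track=rewrite | github.com/jsoo5/Algorithm | 프로그래머스/2/42626. 더 맵게/더 맵게.py | solution
-- ===== SOURCE A (Python) =====
-- import heapq
--
-- def solution(scoville, K):
--     count = 0
--     new_scoville = 0
--     heapq.heapify(scoville)
--
--     while scoville[0] < K:
--
--         if len(scoville) < 2:
--             return -1
--
--         first = heapq.heappop(scoville)
--         second = heapq.heappop(scoville)
--         new_scoville = first + (second * 2)
--
--         heapq.heappush(scoville, new_scoville)
--         count += 1
--
--     return count
-- ===== SOURCE B (Python) =====
-- def _insort(a, x):
--     lo, hi = 0, len(a)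
--     while lo < hi:
--         mid = (lo + hi) // 2
--         if x < a[mid]:
--             hi = mid
--         else:
--             lo = mid + 1
--     a.insert(lo, x)
--
-- def solution(scoville, K):
--     scoville.sort()
--     count = 0
--     while scoville[0] < K:
--         if len(scoville) < 2:
--             return -1
--         first = scoville.pop(0)
--         second = scoville.pop(0)
--         _insort(scoville, first + second * 2)
--         count += 1
--     return count
-- ===== Notes on version B (the rewrite author's own statement) =====
-- stated objective: alternative
-- what changed: Replaces heapq's binary min-heap (heapify + heappop/heappush sift operations) by a list sorted once up front and kept fully sorted with a hand-written bisect-right binary search plus pop(0)/insert.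
import Mathlib
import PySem

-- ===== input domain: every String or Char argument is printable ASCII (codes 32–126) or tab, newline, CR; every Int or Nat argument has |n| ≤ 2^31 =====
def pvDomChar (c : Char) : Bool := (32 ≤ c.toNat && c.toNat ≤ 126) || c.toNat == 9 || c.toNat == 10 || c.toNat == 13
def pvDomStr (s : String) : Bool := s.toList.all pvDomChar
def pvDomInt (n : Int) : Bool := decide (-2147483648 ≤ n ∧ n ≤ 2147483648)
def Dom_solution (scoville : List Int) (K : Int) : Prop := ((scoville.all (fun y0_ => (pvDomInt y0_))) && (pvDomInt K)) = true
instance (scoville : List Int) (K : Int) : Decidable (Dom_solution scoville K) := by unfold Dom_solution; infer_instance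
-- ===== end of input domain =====

-- B replaces A's binary heap by a single sort plus binary-search insertion into a list kept
-- fully sorted; return values agree, both Pythons mutate `scoville` in place (A leaves heap
-- order, B leaves sorted order) — the equivalence proved here is about the return value only.

-- ===== PORT A =====
-- A calls the `heapq` library (C implementation of the array binary min-heap); its calls are
-- ported as the corresponding Lean functions on `List Int`: the standard array min-heap with
-- sift-down/sift-up, `heapify` = Floyd's bottom-up construction, exactly heapq's data layout
-- (children of i at 2i+1, 2i+2).  Reads `heap[0]` on an empty list default to 0: Python raises
-- IndexError there, which Pre_solution excludes (the loop itself never sees an empty heap).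

def pvSwap (l : List Int) (i j : Nat) : List Int :=
  (l.set i (l.getD j 0)).set j (l.getD i 0)

theorem pvSwap_length (l : List Int) (i j : Nat) : (pvSwap l i j).length = l.length := by
  simp [pvSwap]

-- index of the smallest among position pos and its (in-range) children
def pvMinChild (l : List Int) (pos : Nat) : Nat :=
  let n := l.length
  let m1 := if 2*pos+1 < n ∧ l.getD (2*pos+1) 0 < l.getD pos 0 then 2*pos+1 else pos
  if 2*pos+2 < n ∧ l.getD (2*pos+2) 0 < l.getD m1 0 then 2*pos+2 else m1

theorem pvMinChild_lt (l : List Int) (pos : Nat) (h : pvMinChild l pos ≠ pos) :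
    pos < pvMinChild l pos ∧ pvMinChild l pos < l.length := by
  unfold pvMinChild at h ⊢
  dsimp only at h ⊢
  split_ifs at h ⊢ with h1 h2 h2
  · exact ⟨by omega, h2.1⟩
  · exact ⟨by omega, h1.1⟩
  · exact ⟨by omega, h2.1⟩
  · exact absurd rfl h

theorem pvSiftDown_dec (l : List Int) (pos : Nat) (h : pvMinChild l pos ≠ pos) :
    (pvSwap l pos (pvMinChild l pos)).length - pvMinChild l pos < l.length - pos := by
  have h2 := pvMinChild_lt l pos h
  rw [pvSwap_length]
  exact Nat.sub_lt_sub_left (Nat.lt_of_lt_of_le h2.1 (Nat.le_of_lt h2.2)) h2.1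

def pvSiftDown (l : List Int) (pos : Nat) : List Int :=
  let m := pvMinChild l pos
  if m = pos then l else pvSiftDown (pvSwap l pos m) m
termination_by l.length - pos
decreasing_by
  exact pvSiftDown_dec l pos (by assumption)

theorem pvSiftDown_length (l : List Int) (pos : Nat) :
    (pvSiftDown l pos).length = l.length := by
  fun_induction pvSiftDown l pos with
  | case1 => rfl
  | case2 l pos m h ih => rw [ih, pvSwap_length]

theorem pvSiftUp_dec (pos : Nat) (h : 0 < pos) : (pos - 1) / 2 < pos := by
  omega

def pvSiftUp (l : List Int) (pos : Nat) : List Int :=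
  if h : 0 < pos then
    let p := (pos - 1) / 2
    if l.getD pos 0 < l.getD p 0 then pvSiftUp (pvSwap l pos p) p else l
  else l
termination_by pos
decreasing_by
  exact pvSiftUp_dec pos h

theorem pvSiftUp_length (l : List Int) (pos : Nat) :
    (pvSiftUp l pos).length = l.length := by
  fun_induction pvSiftUp l pos with
  | case1 l pos h p hlt ih => rw [ih, pvSwap_length]
  | case2 => rfl
  | case3 => rfl

def pvHeapify (l : List Int) : List Int :=
  (List.range (l.length / 2)).reverse.foldl (fun h i => pvSiftDown h i) l

def pvHeappop (l : List Int) : Int × List Int :=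
  match l with
  | [] => (0, [])                 -- unreachable: A's loop never pops an empty heap
  | [x] => (x, [])
  | x :: _ :: _ => (x, pvSiftDown ((l.dropLast).set 0 (l.getLastD 0)) 0)

theorem pvHeappop_length (l : List Int) (h : l ≠ []) :
    (pvHeappop l).2.length + 1 = l.length := by
  match l with
  | [] => exact absurd rfl h
  | [x] => rfl
  | x :: y :: t =>
    simp [pvHeappop, pvSiftDown_length]

def pvHeappush (l : List Int) (x : Int) : List Int :=
  pvSiftUp (l ++ [x]) l.length

theorem pvHeappush_length (l : List Int) (x : Int) :
    (pvHeappush l x).length = l.length + 1 := by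
  simp [pvHeappush, pvSiftUp_length]

theorem pvLoopA_dec (heap : List Int) (v : Int) (h2 : ¬heap.length < 2) :
    (pvHeappush (pvHeappop (pvHeappop heap).2).2 v).length < heap.length := by
  have h1 : (pvHeappop heap).2.length + 1 = heap.length :=
    pvHeappop_length heap (by intro he; rw [he] at h2; simp at h2)
  have h2' : (pvHeappop (pvHeappop heap).2).2.length + 1 = (pvHeappop heap).2.length :=
    pvHeappop_length _ (by
      intro he
      rw [he] at h1
      simp at h1
      omega)
  rw [pvHeappush_length]
  omega

def pvLoopA (heap : List Int) (K : Int) (count : Int) : Int :=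
  if heap.getD 0 0 < K then
    if h2 : heap.length < 2 then -1
    else
      let p1 := pvHeappop heap
      let p2 := pvHeappop p1.2
      pvLoopA (pvHeappush p2.2 (p1.1 + p2.1 * 2)) K (count + 1)
  else count
termination_by heap.length
decreasing_by
  exact pvLoopA_dec heap _ h2

def solution (scoville : List Int) (K : Int) : Int :=
  pvLoopA (pvHeapify scoville) K 0

-- ===== PORT B =====
-- Source B: sort once, then repeatedly pop the two smallest from the front and re-insert the mix
-- at the position found by a hand-written bisect-right binary search (= PySem.List.bisectRight,
-- the prelude's primitive for exactly that loop).  `scoville[0]` on the empty list raises in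
-- Python (excluded by Pre_solution); the port defaults that read to 0.

def pvInsort (l : List Int) (x : Int) : List Int :=
  l.insertIdx (PySem.List.bisectRight l x) x

theorem pvBisectRightLoop_le (l : List Int) (x : Int) (fuel lo hi : Nat) (h : lo ≤ hi) :
    PySem.List.bisectRightLoop l x fuel lo hi ≤ hi := by
  induction fuel generalizing lo hi with
  | zero => simpa [PySem.List.bisectRightLoop]
  | succ fuel ih =>
    rw [PySem.List.bisectRightLoop]
    split_ifs with hlt
    · match hg : l[(lo + hi) / 2]? with
      | some y =>
        simp only []
        split_ifs with hxy
        · exact le_trans (ih lo ((lo + hi) / 2) (by omega)) (by omega)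
        · exact ih ((lo + hi) / 2 + 1) hi (by omega)
      | none => simpa [hg]
    · simpa

theorem pvBisectRight_le (l : List Int) (x : Int) :
    PySem.List.bisectRight l x ≤ l.length :=
  pvBisectRightLoop_le l x l.length 0 l.length (Nat.zero_le _)

theorem pvInsort_length (l : List Int) (x : Int) :
    (pvInsort l x).length = l.length + 1 := by
  have h := pvBisectRight_le l x
  simp [pvInsort, List.length_insertIdx, h]

theorem pvLoopB_dec (l : List Int) (v : Int) (h2 : ¬l.length < 2) :
    (pvInsort ((l.drop 1).drop 1) v).length < l.length := by
  rw [pvInsort_length]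
  simp only [List.length_drop]
  omega

def pvLoopB (l : List Int) (K : Int) (count : Int) : Int :=
  if l.getD 0 0 < K then
    if h2 : l.length < 2 then -1
    else
      let first := l.getD 0 0
      let l1 := l.drop 1
      let second := l1.getD 0 0
      let l2 := l1.drop 1
      pvLoopB (pvInsort l2 (first + second * 2)) K (count + 1)
  else count
termination_by l.length
decreasing_by
  exact pvLoopB_dec l _ h2

def solution_alt (scoville : List Int) (K : Int) : Int :=
  pvLoopB (PySem.List.sorted scoville (fun x => x)) K 0

-- ===== PRECONDITION & SPEC =====
-- Pre_ excludes only the empty list, on which Python A raises IndexError at `scoville[0]`.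
def Pre_solution (scoville : List Int) (K : Int) : Prop := scoville ≠ []
instance (scoville : List Int) (K : Int) : Decidable (Pre_solution scoville K) := by
  unfold Pre_solution; infer_instance

def pvWitness_solution : List Int × Int := ([1, 2, 3, 9, 10, 12], 7)

def Spec_solution (scoville : List Int) (K : Int) (out : Int) : Prop := out = solution_alt scoville K
instance (scoville : List Int) (K : Int) (out : Int) : Decidable (Spec_solution scoville K out) := by unfold Spec_solution; infer_instance

-- ===== CLAIM (what is proved, stated in full; the proofs are below) =====
def Claim_equal_solution : Prop := ∀ (scoville : List Int) (K : Int), Dom_solution scoville K → Pre_solution scoville K → Spec_solution scoville K (solution scoville K)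

-- ===== LEMMAS AND PROOFS =====

-- `l.getD · 0` view of `List.set`
theorem pvGetD_set (l : List Int) (i j : Nat) (a : Int) :
    (l.set i a).getD j 0 = if i = j ∧ i < l.length then a else l.getD j 0 := by
  simp only [List.getD_eq_getElem?_getD, List.getElem?_set]
  split_ifs with h1 h2 h3 h4 <;> (simp_all; try omega)

theorem pvSwap_getD_left (l : List Int) (i j : Nat) (hi : i < l.length) (hj : j < l.length) :
    (pvSwap l i j).getD i 0 = l.getD j 0 := by
  unfold pvSwap
  rw [pvGetD_set, pvGetD_set]
  by_cases h : j = i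
  · subst h; simp [hj]
  · simp [h, hi]

theorem pvSwap_getD_right (l : List Int) (i j : Nat) (hj : j < l.length) :
    (pvSwap l i j).getD j 0 = l.getD i 0 := by
  unfold pvSwap
  rw [pvGetD_set]
  simp [hj]

theorem pvSwap_getD_other (l : List Int) (i j k : Nat) (hki : k ≠ i) (hkj : k ≠ j) :
    (pvSwap l i j).getD k 0 = l.getD k 0 := by
  unfold pvSwap
  rw [pvGetD_set, pvGetD_set]
  simp [Ne.symm hki, Ne.symm hkj]

theorem pvConsSet_perm (xs : List Int) (k : Nat) (x : Int) (hk : k < xs.length) :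
    (xs.getD k 0 :: xs.set k x).Perm (x :: xs) := by
  induction xs generalizing k with
  | nil => simp at hk
  | cons y t ih =>
    cases k with
    | zero => simpa using List.Perm.swap x y t
    | succ k =>
      have hk' : k < t.length := by simpa using hk
      have h1 : (t.getD k 0 :: y :: t.set k x).Perm (y :: t.getD k 0 :: t.set k x) :=
        List.Perm.swap _ _ _
      have h2 : (y :: t.getD k 0 :: t.set k x).Perm (y :: x :: t) := (ih k hk').cons y
      have h3 : (y :: x :: t).Perm (x :: y :: t) := List.Perm.swap _ _ _
      exact h1.trans (h2.trans h3)

theorem pvSwap_perm (l : List Int) (i j : Nat) (hi : i < l.length) (hj : j < l.length) :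
    (pvSwap l i j).Perm l := by
  induction l generalizing i j with
  | nil => simp at hi
  | cons x t ih =>
    cases i with
    | zero =>
      cases j with
      | zero => simp [pvSwap]
      | succ j =>
        have hj' : j < t.length := by simpa using hj
        unfold pvSwap
        simp only [List.getD_cons_succ, List.getD_cons_zero, List.set_cons_zero,
          List.set_cons_succ]
        exact pvConsSet_perm t j x hj' 
    | succ i =>
      cases j with
      | zero =>
        have hi' : i < t.length := by simpa using hi
        unfold pvSwap
        simp only [List.getD_cons_succ, List.getD_cons_zero, List.set_cons_zero,
          List.set_cons_succ]
        exact pvConsSet_perm t i x hi' 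
      | succ j =>
        have hi' : i < t.length := by simpa using hi
        have hj' : j < t.length := by simpa using hj
        unfold pvSwap
        simp only [List.getD_cons_succ, List.set_cons_succ]
        exact (ih i j hi' hj').cons x

-- heap property from index s upwards: every parent/child pair with parent index ≥ s is ordered
def pvHeapGe (l : List Int) (s : Nat) : Prop :=
  ∀ j, j < l.length → 0 < j → s ≤ (j - 1) / 2 → l.getD ((j - 1) / 2) 0 ≤ l.getD j 0

theorem pvMinChild_spec (l : List Int) (pos : Nat) (h : pvMinChild l pos ≠ pos) :
    pvMinChild l pos < l.length ∧ pos < pvMinChild l pos ∧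
    (pvMinChild l pos = 2 * pos + 1 ∨ pvMinChild l pos = 2 * pos + 2) ∧
    l.getD (pvMinChild l pos) 0 < l.getD pos 0 ∧
    (∀ c, (c = 2 * pos + 1 ∨ c = 2 * pos + 2) → c < l.length →
      l.getD (pvMinChild l pos) 0 ≤ l.getD c 0) := by
  unfold pvMinChild at h ⊢
  dsimp only at h ⊢
  by_cases h1 : 2 * pos + 1 < l.length ∧ l.getD (2 * pos + 1) 0 < l.getD pos 0
  · rw [if_pos h1] at h ⊢
    by_cases h2 : 2 * pos + 2 < l.length ∧ l.getD (2 * pos + 2) 0 < l.getD (2 * pos + 1) 0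
    · rw [if_pos h2] at h ⊢
      refine ⟨h2.1, by omega, Or.inr rfl, by linarith [h1.2, h2.2], ?_⟩
      intro c hc hcl
      rcases hc with hc | hc <;> subst hc
      · linarith [h2.2]
      · exact le_refl _
    · rw [if_neg h2] at h ⊢
      push_neg at h2
      refine ⟨h1.1, by omega, Or.inl rfl, h1.2, ?_⟩
      intro c hc hcl
      rcases hc with hc | hc <;> subst hc
      · exact le_refl _
      · exact h2 hcl
  · rw [if_neg h1] at h ⊢
    push_neg at h1
    by_cases h2 : 2 * pos + 2 < l.length ∧ l.getD (2 * pos + 2) 0 < l.getD pos 0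
    · rw [if_pos h2] at h ⊢
      refine ⟨h2.1, by omega, Or.inr rfl, h2.2, ?_⟩
      intro c hc hcl
      rcases hc with hc | hc <;> subst hc
      · linarith [h1 hcl, h2.2]
      · exact le_refl _
    · rw [if_neg h2] at h ⊢
      exact absurd rfl h

theorem pvMinChild_eq_spec (l : List Int) (pos : Nat) (h : pvMinChild l pos = pos) :
    ∀ c, (c = 2 * pos + 1 ∨ c = 2 * pos + 2) → c < l.length →
      l.getD pos 0 ≤ l.getD c 0 := by
  unfold pvMinChild at h
  dsimp only at h
  by_cases h1 : 2 * pos + 1 < l.length ∧ l.getD (2 * pos + 1) 0 < l.getD pos 0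
  · rw [if_pos h1] at h
    split_ifs at h <;> omega
  · rw [if_neg h1] at h
    push_neg at h1
    by_cases h2 : 2 * pos + 2 < l.length ∧ l.getD (2 * pos + 2) 0 < l.getD pos 0
    · rw [if_pos h2] at h; omega
    · push_neg at h2
      intro c hc hcl
      rcases hc with hc | hc <;> subst hc
      · exact h1 hcl
      · exact h2 hcl

theorem pvSiftDown_correct (l : List Int) (pos : Nat) : ∀ s : Nat, s ≤ pos →
    (∀ j, j < l.length → 0 < j → s ≤ (j - 1) / 2 → (j - 1) / 2 ≠ pos →
      l.getD ((j - 1) / 2) 0 ≤ l.getD j 0) →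
    (s < pos → ∀ j, j < l.length → 0 < j → (j - 1) / 2 = pos →
      l.getD ((pos - 1) / 2) 0 ≤ l.getD j 0) →
    pvHeapGe (pvSiftDown l pos) s := by
  fun_induction pvSiftDown l pos with
  | case1 l pos m hm =>
    -- the sift stops: children of pos are already ≥ it
    intro s hsp hA hB
    intro j hj hj0 hjs
    by_cases hpar : (j - 1) / 2 = pos
    · exact hpar ▸ pvMinChild_eq_spec l pos hm j (by omega) hj
    · exact hA j hj hj0 hjs hpar
  | case2 l pos m hm ih =>
    intro s hsp hA hB
    obtain ⟨hmlen, hposm, hchild, hlt, hmin⟩ := pvMinChild_spec l pos hm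
    have hposlen : pos < l.length := lt_trans hposm hmlen
    have hLpos : (pvSwap l pos m).getD pos 0 = l.getD m 0 := pvSwap_getD_left l pos m hposlen hmlen
    have hLm : (pvSwap l pos m).getD m 0 = l.getD pos 0 := pvSwap_getD_right l pos m hmlen
    have hLo : ∀ k, k ≠ pos → k ≠ m → (pvSwap l pos m).getD k 0 = l.getD k 0 :=
      fun k h1 h2 => pvSwap_getD_other l pos m k h1 h2
    have hlen : (pvSwap l pos m).length = l.length := pvSwap_length l pos m
    apply ih s (by omega)
    · -- the hole moves to m; every other ordered pair survives the swap
      intro j hj hj0 hjs hjm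
      rw [hlen] at hj
      by_cases hjpos : j = pos
      · -- edge (parent pos, pos): new value at pos is the old child minimum
        rw [hjpos]
        have hppm : (pos - 1) / 2 ≠ m := by omega
        have hpp : (pos - 1) / 2 ≠ pos := by omega
        rw [hLo _ hpp hppm, hLpos]
        exact hB (by omega) m hmlen (by omega) (by omega)
      · by_cases hjm' : j = m
        · -- edge (pos, m) itself: swapped, the child was strictly smaller
          rw [hjm']
          have hp : (m - 1) / 2 = pos := by omega
          rw [hp, hLpos, hLm]
          exact le_of_lt hlt
        · by_cases hparpos : (j - 1) / 2 = pos
          · -- sibling of m: new value at pos is the minimum of both children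
            rw [hparpos, hLpos, hLo j hjpos hjm']
            exact hmin j (by omega) hj
          · -- edge untouched by the swap
            rw [hLo _ hparpos hjm, hLo j hjpos hjm']
            exact hA j hj hj0 hjs hparpos
    · -- skip-level clause: grandchildren were children of m before the swap
      intro hsm j hj hj0 hpj
      rw [hlen] at hj
      have hjm : j ≠ m := by omega
      have hjpos : j ≠ pos := by omega
      have hmp : (m - 1) / 2 = pos := by omega
      rw [hmp, hLpos, hLo j hjpos hjm]
      have := hA j hj hj0 (by omega) (by omega)
      rwa [hpj] at this

theorem pvSiftDown_perm (l : List Int) (pos : Nat) : (pvSiftDown l pos).Perm l := by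
  fun_induction pvSiftDown l pos with
  | case1 l pos m hm => exact List.Perm.refl l
  | case2 l pos m hm ih =>
    obtain ⟨hmlen, hposm, _, _⟩ := pvMinChild_spec l pos hm
    exact ih.trans (pvSwap_perm l pos m (lt_trans hposm hmlen) hmlen)

theorem pvSiftUp_correct (l : List Int) (pos : Nat) : pos < l.length →
    (∀ j, j < l.length → 0 < j → j ≠ pos → l.getD ((j - 1) / 2) 0 ≤ l.getD j 0) →
    (0 < pos → ∀ c, c < l.length → 0 < c → (c - 1) / 2 = pos →
      l.getD ((pos - 1) / 2) 0 ≤ l.getD c 0) →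
    pvHeapGe (pvSiftUp l pos) 0 := by
  fun_induction pvSiftUp l pos with
  | case1 l pos h0 p hlt ih =>
    intro hpos hA hB
    have hp' : p = (pos - 1) / 2 := rfl
    have hplen : p < l.length := lt_trans (by omega) hpos
    have hLp : (pvSwap l pos p).getD p 0 = l.getD pos 0 := pvSwap_getD_right l pos p hplen
    have hLpos : (pvSwap l pos p).getD pos 0 = l.getD p 0 := pvSwap_getD_left l pos p hpos hplen
    have hLo : ∀ k, k ≠ pos → k ≠ p → (pvSwap l pos p).getD k 0 = l.getD k 0 :=
      fun k h1 h2 => pvSwap_getD_other l pos p k h1 h2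
    have hlen : (pvSwap l pos p).length = l.length := pvSwap_length l pos p
    apply ih (by rw [hlen]; exact hplen)
    · intro j hj hj0 hjp
      rw [hlen] at hj
      by_cases hjpos : j = pos
      · -- the swapped pair itself
        rw [hjpos]
        have h1 : (pos - 1) / 2 = p := hp'.symm
        rw [h1, hLp, hLpos]
        exact le_of_lt hlt
      · by_cases hparj : (j - 1) / 2 = pos
        · -- a child of pos: its new parent value is the old grandparent value
          rw [hparj, hLpos, hLo j hjpos (by omega)]
          rw [hp']
          exact hB h0 j hj hj0 hparj
        · by_cases hparp : (j - 1) / 2 = p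
          · -- sibling of pos under p
            rw [hparp, hLp, hLo j hjpos (by omega)]
            have := hA j hj hj0 hjpos
            rw [hparp, hp'] at this
            calc l.getD pos 0 ≤ l.getD ((pos - 1) / 2) 0 := le_of_lt hlt
              _ ≤ l.getD j 0 := this
          · rw [hLo _ hparj hparp, hLo j hjpos hjp]
            exact hA j hj hj0 hjpos
    · -- skip-level clause for the new hole p
      intro hp0 c hc hc0 hparc
      rw [hlen] at hc
      have hppn : (p - 1) / 2 ≠ pos := by omega
      have hppp : (p - 1) / 2 ≠ p := by omega
      rw [hLo _ hppn hppp]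
      by_cases hcp : c = pos
      · rw [hcp, hLpos]
        exact hA p hplen hp0 (by omega)
      · rw [hLo c hcp (by omega)]
        refine le_trans (hA p hplen hp0 (by omega)) ?_
        have := hA c hc hc0 hcp
        rwa [hparc] at this
  | case2 l pos h0 p hge =>
    intro hpos hA hB
    intro j hj hj0 _
    by_cases hjpos : j = pos
    · subst hjpos
      exact not_lt.mp hge
    · exact hA j hj hj0 hjpos
  | case3 l pos h0 =>
    intro hpos hA hB
    intro j hj hj0 _
    exact hA j hj hj0 (by omega)

theorem pvSiftUp_perm (l : List Int) (pos : Nat) : pos < l.length → (pvSiftUp l pos).Perm l := by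
  fun_induction pvSiftUp l pos with
  | case1 l pos h0 p hlt ih =>
    intro hpos
    have hplen : p < l.length := lt_trans (by omega) hpos
    have := ih (by rw [pvSwap_length]; exact hplen)
    exact this.trans (pvSwap_perm l pos p hpos hplen)
  | case2 l pos h0 p hge => intro _; exact List.Perm.refl l
  | case3 l pos h0 => intro _; exact List.Perm.refl l

-- ----- Floyd heap construction -----

theorem pvHeapifyAux (k : Nat) : ∀ l : List Int, pvHeapGe l k →
    pvHeapGe ((List.range k).reverse.foldl (fun h i => pvSiftDown h i) l) 0 ∧
    ((List.range k).reverse.foldl (fun h i => pvSiftDown h i) l).Perm l := by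
  induction k with
  | zero =>
    intro l h
    exact ⟨fun j hj hj0 _ => h j hj hj0 (Nat.zero_le _), List.Perm.refl l⟩
  | succ k ih =>
    intro l h
    rw [List.range_succ, List.reverse_append, List.reverse_singleton, List.singleton_append,
      List.foldl_cons]
    have hk : pvHeapGe (pvSiftDown l k) k := by
      apply pvSiftDown_correct l k k (le_refl k)
      · intro j hj hj0 hjs hjk
        exact h j hj hj0 (by omega)
      · omega
    obtain ⟨h1, h2⟩ := ih (pvSiftDown l k) hk
    exact ⟨h1, h2.trans (pvSiftDown_perm l k)⟩

theorem pvHeapify_correct (l : List Int) :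
    pvHeapGe (pvHeapify l) 0 ∧ (pvHeapify l).Perm l := by
  unfold pvHeapify
  apply pvHeapifyAux
  intro j hj hj0 hjs
  omega

-- in a heap the root is a minimum
theorem pvHeap_root_min (l : List Int) (h : pvHeapGe l 0) :
    ∀ j, j < l.length → l.getD 0 0 ≤ l.getD j 0 := by
  intro j
  induction j using Nat.strong_induction_on with
  | _ j ih =>
    intro hj
    cases Nat.eq_zero_or_pos j with
    | inl h0 => rw [h0]
    | inr h0 =>
      have hpar : (j - 1) / 2 < j := by omega
      exact le_trans (ih _ hpar (by omega)) (h j hj h0 (Nat.zero_le _))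

-- getD of dropLast/set prefix used by heappop
theorem pvPopState_getD (l : List Int) (j : Nat) (hj : 0 < j) (hjl : j < l.length - 1) :
    ((l.dropLast).set 0 (l.getLastD 0)).getD j 0 = l.getD j 0 := by
  rw [pvGetD_set]
  rw [if_neg (by omega)]
  rw [List.dropLast_eq_take, List.getD_eq_getElem?_getD, List.getElem?_take,
    if_pos (by omega), ← List.getD_eq_getElem?_getD]

theorem pvLastPerm (u : List Int) (d : Int) (hu : u ≠ []) :
    u.Perm (u.getLastD d :: u.dropLast) := by
  have hgl : u.getLastD d = u.getLast hu := by
    rw [List.getLastD_eq_getLast?, List.getLast?_eq_some_getLast hu]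
    rfl
  rw [hgl]
  conv_lhs => rw [← List.dropLast_concat_getLast hu]
  exact List.perm_append_singleton _ _

theorem pvHeappop_spec (l : List Int) (hne : l ≠ []) (h : pvHeapGe l 0) :
    (pvHeappop l).1 = l.getD 0 0 ∧ pvHeapGe (pvHeappop l).2 0 ∧
    l.Perm ((pvHeappop l).1 :: (pvHeappop l).2) := by
  match l with
  | [] => exact absurd rfl hne
  | [x] =>
    refine ⟨rfl, fun j hj hj0 _ => by simp [pvHeappop] at hj, by simp [pvHeappop]⟩
  | x :: y :: t =>
    set l := x :: y :: t with hl
    have hlen2 : 2 ≤ l.length := by simp only [hl, List.length_cons]; omega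
    set m := (l.dropLast).set 0 (l.getLastD 0) with hm
    have hmlen : m.length = l.length - 1 := by
      rw [hm]
      simp [List.length_dropLast]
    refine ⟨rfl, ?_, ?_⟩
    · -- the repaired prefix sifts down into a heap
      show pvHeapGe (pvSiftDown m 0) 0
      apply pvSiftDown_correct m 0 0 (le_refl 0)
      · intro j hj hj0 hjs hjn
        have hj' : j < l.length - 1 := by omega
        have hpar0 : 0 < (j - 1) / 2 := by omega
        rw [pvPopState_getD l j hj0 hj', pvPopState_getD l ((j - 1) / 2) hpar0 (by omega)]
        exact h j (by omega) hj0 (Nat.zero_le _)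
      · omega
    · -- multiset bookkeeping: l ~ root :: repaired prefix
      show l.Perm (x :: pvSiftDown m 0)
      have hperm : (pvSiftDown m 0).Perm m := pvSiftDown_perm m 0
      refine List.Perm.trans ?_ ((hperm.symm).cons x)
      have hm2 : m = (y :: t).getLastD x :: (y :: t).dropLast := by
        rw [hm, hl, List.getLastD_cons, List.dropLast_cons₂, List.set_cons_zero]
      rw [hm2, hl]
      exact ((pvLastPerm (y :: t) x (by simp))).cons x

theorem pvHeappush_spec (l : List Int) (x : Int) (h : pvHeapGe l 0) :
    pvHeapGe (pvHeappush l x) 0 ∧ (pvHeappush l x).Perm (x :: l) := by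
  have hlen : l.length < (l ++ [x]).length := by simp
  have hg : ∀ j, j < l.length → (l ++ [x]).getD j 0 = l.getD j 0 := by
    intro j hj
    rw [List.getD_eq_getElem?_getD, List.getElem?_append_left hj, ← List.getD_eq_getElem?_getD]
  constructor
  · apply pvSiftUp_correct (l ++ [x]) l.length hlen
    · intro j hj hj0 hjp
      have hj' : j < l.length := by simp at hj; omega
      rw [hg j hj', hg ((j - 1) / 2) (by omega)]
      exact h j hj' hj0 (Nat.zero_le _)
    · intro _ c hc hc0 hparc
      simp at hc
      omega
  · exact (pvSiftUp_perm (l ++ [x]) l.length hlen).trans (List.perm_append_singleton x l)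

-- ----- B side: sorted-list lemmas -----

theorem pvInsertIdx_eq (l : List Int) (k : Nat) (x : Int) (hk : k ≤ l.length) :
    l.insertIdx k x = l.take k ++ x :: l.drop k := by
  induction l generalizing k with
  | nil =>
    simp only [List.length_nil, Nat.le_zero] at hk
    subst hk
    simp
  | cons y t ih =>
    cases k with
    | zero => simp
    | succ k =>
      simp only [List.insertIdx_succ_cons, List.take_succ_cons, List.drop_succ_cons,
        List.cons_append]
      rw [ih k (by simpa using hk)]

theorem pvInsort_sorted (l : List Int) (x : Int) (h : List.Pairwise (· ≤ ·) l) :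
    List.Pairwise (· ≤ ·) (pvInsort l x) ∧ (pvInsort l x).Perm (x :: l) := by
  obtain ⟨hle, hbefore, hafter⟩ := PySem.List.bisectRight_spec l x h
  set k := PySem.List.bisectRight l x with hk
  constructor
  · rw [pvInsort, pvInsertIdx_eq l k x hle, List.pairwise_append]
    refine ⟨h.take, ?_, ?_⟩
    · rw [List.pairwise_cons]
      refine ⟨?_, h.drop⟩
      intro b hb
      obtain ⟨i, hi, rfl⟩ := List.mem_iff_getElem.mp hb
      rw [List.getElem_drop]
      exact le_of_lt (hafter (k + i) (by simp at hi; omega) (by omega))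
    · intro a ha b hb
      obtain ⟨i, hi, rfl⟩ := List.mem_iff_getElem.mp ha
      have hik : i < k := by simp at hi; omega
      have hil : i < l.length := by simp at hi; omega
      rw [List.getElem_take]
      rcases List.mem_cons.mp hb with rfl | hb'
      · exact hbefore i hil hik
      · obtain ⟨j, hj, rfl⟩ := List.mem_iff_getElem.mp hb'
        rw [List.getElem_drop]
        have hpg := List.pairwise_iff_getElem.mp h
        exact le_of_lt (lt_of_le_of_lt (hbefore i hil hik)
          (hafter (k + j) (by simp at hj; omega) (by omega)))
  · exact List.perm_insertIdx x l hle

-- sorted lists: the head is a minimum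
theorem pvSorted_head_min (l : List Int) (h : List.Pairwise (· ≤ ·) l) :
    ∀ j, j < l.length → l.getD 0 0 ≤ l.getD j 0 := by
  intro j hj
  cases Nat.eq_zero_or_pos j with
  | inl h0 => rw [h0]
  | inr h0 =>
    have h0l : 0 < l.length := by omega
    have := (List.pairwise_iff_getElem.mp h) 0 j h0l hj h0
    rw [List.getD_eq_getElem?_getD, List.getD_eq_getElem?_getD,
      List.getElem?_eq_getElem h0l, List.getElem?_eq_getElem hj]
    simpa using this

-- a min-heap and a sorted list holding the same multiset expose the same minimum up front
theorem pvRoots_eq (h l : List Int) (hh : pvHeapGe h 0) (hs : List.Pairwise (· ≤ ·) l)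
    (hp : h.Perm l) (hne : h ≠ []) : h.getD 0 0 = l.getD 0 0 := by
  have hlne : l ≠ [] := by
    intro he
    rw [he] at hp
    exact hne (List.Perm.eq_nil hp)
  have hmem : h.getD 0 0 ∈ h := by
    rw [List.getD_eq_getElem?_getD, List.getElem?_eq_getElem (by
      cases h with | nil => exact absurd rfl hne | cons a t => simp)]
    exact List.getElem_mem _
  have lmem : l.getD 0 0 ∈ l := by
    rw [List.getD_eq_getElem?_getD, List.getElem?_eq_getElem (by
      cases l with | nil => exact absurd rfl hlne | cons a t => simp)]
    exact List.getElem_mem _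
  -- each head is ≤ the other (as a member of the common multiset)
  obtain ⟨i, hi, hieq⟩ := List.mem_iff_getElem.mp (hp.mem_iff.mpr lmem)
  obtain ⟨j, hj, hjeq⟩ := List.mem_iff_getElem.mp (hp.symm.mem_iff.mpr hmem)
  have h1 : h.getD 0 0 ≤ l.getD 0 0 := by
    have := pvHeap_root_min h hh i hi
    rw [List.getD_eq_getElem?_getD (l := h) (i := i), List.getElem?_eq_getElem hi] at this
    simpa [hieq] using this
  have h2 : l.getD 0 0 ≤ h.getD 0 0 := by
    have := pvSorted_head_min l hs j hj
    rw [List.getD_eq_getElem?_getD (l := l) (i := j), List.getElem?_eq_getElem hj] at this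
    simpa [hjeq] using this
  omega

-- ----- the two loops agree on any heap/sorted pair holding the same multiset -----

theorem pvLoop_eq : ∀ (n : Nat) (h l : List Int) (K count : Int), h.length = n →
    pvHeapGe h 0 → List.Pairwise (· ≤ ·) l → h.Perm l →
    pvLoopA h K count = pvLoopB l K count := by
  intro n
  induction n using Nat.strong_induction_on with
  | _ n ih =>
    intro h l K count hn hh hs hp
    have hlen : l.length = n := by rw [← hp.length_eq, hn]
    by_cases hempty : n = 0
    · have h0 : h = [] := List.length_eq_zero_iff.mp (by omega)
      have l0 : l = [] := List.length_eq_zero_iff.mp (by omega)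
      subst h0; subst l0
      rw [pvLoopA, pvLoopB]
      simp
    · have hne : h ≠ [] := by
        intro he
        rw [he] at hn
        simp at hn
        omega
      have hroot : h.getD 0 0 = l.getD 0 0 := pvRoots_eq h l hh hs hp hne
      rw [pvLoopA, pvLoopB]
      simp only [hroot, hp.length_eq]
      split_ifs with hK hlen2
      · rfl
      · -- main mixing step
        obtain ⟨a, l', rfl⟩ : ∃ a l', l = a :: l' := by
          cases l with
          | nil => simp at hlen; omega
          | cons a l' => exact ⟨a, l', rfl⟩
        obtain ⟨b, l'', rfl⟩ : ∃ b l'', l' = b :: l'' := by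
          cases l' with
          | nil => simp at hlen2
          | cons b l'' => exact ⟨b, l'', rfl⟩
        obtain ⟨hp1v, hp1h, hp1p⟩ := pvHeappop_spec h hne hh
        have hlen1 : (pvHeappop h).2.length + 1 = h.length := pvHeappop_length h hne
        have hlal : h.length = l''.length + 2 := by
          rw [hp.length_eq]
          simp
        have hne1 : (pvHeappop h).2 ≠ [] := by
          intro he
          rw [he] at hlen1
          simp at hlen1
          omega
        obtain ⟨hp2v, hp2h, hp2p⟩ := pvHeappop_spec (pvHeappop h).2 hne1 hp1h
        have hlen22 : (pvHeappop (pvHeappop h).2).2.length + 1 = (pvHeappop h).2.length :=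
          pvHeappop_length _ hne1
        -- identify the two popped values with the two sorted heads
        have ha : (pvHeappop h).1 = a := by rw [hp1v, hroot]; rfl
        rw [ha] at hp1p
        have htail : (pvHeappop h).2.Perm (b :: l'') := ((hp1p.symm).trans hp).cons_inv
        have hstail : List.Pairwise (· ≤ ·) (b :: l'') := (List.pairwise_cons.mp hs).2
        have hb : (pvHeappop (pvHeappop h).2).1 = b := by
          rw [hp2v]
          exact pvRoots_eq _ _ hp1h hstail htail hne1
        rw [hb] at hp2p
        have htail2 : (pvHeappop (pvHeappop h).2).2.Perm l'' := ((hp2p.symm).trans htail).cons_inv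
        -- the pushed/inserted mix
        obtain ⟨hpushh, hpushp⟩ :=
          pvHeappush_spec (pvHeappop (pvHeappop h).2).2
            ((pvHeappop h).1 + (pvHeappop (pvHeappop h).2).1 * 2) hp2h
        have hs'' : List.Pairwise (· ≤ ·) l'' := (List.pairwise_cons.mp hstail).2
        obtain ⟨hinss, hinsp⟩ :=
          pvInsort_sorted l'' ((a : Int) + b * 2) hs''
        have hveq : (pvHeappop h).1 + (pvHeappop (pvHeappop h).2).1 * 2 = a + b * 2 := by
          rw [ha, hb]
        have hpermfin :
            (pvHeappush (pvHeappop (pvHeappop h).2).2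
              ((pvHeappop h).1 + (pvHeappop (pvHeappop h).2).1 * 2)).Perm
            (pvInsort l'' (a + b * 2)) := by
          refine hpushp.trans (List.Perm.trans ?_ hinsp.symm)
          rw [hveq]
          exact htail2.cons _
        have hlenfin :
            (pvHeappush (pvHeappop (pvHeappop h).2).2
              ((pvHeappop h).1 + (pvHeappop (pvHeappop h).2).1 * 2)).length = n - 1 := by
          rw [pvHeappush_length]
          omega
        have hgoal := ih (n - 1) (by omega) _ _ K (count + 1) hlenfin hpushh hinss hpermfin
        -- align B's popped arguments with the list heads
        simpa [List.getD_cons_zero, List.getD_cons_succ, hveq] using hgoal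
      · rfl

-- ===== VERDICT (by name: the statement is the Claim_ definition above) =====
theorem solution_spec : Claim_equal_solution := by
  intro scoville K hdom hpre
  show solution scoville K = solution_alt scoville K
  obtain ⟨hh, hperm⟩ := pvHeapify_correct scoville
  have hsorted : List.Pairwise (· ≤ ·) (PySem.List.sorted scoville (fun x => x)) :=
    PySem.List.sorted_pairwise scoville (fun x => x)
  have hsp : (PySem.List.sorted scoville (fun x => x)).Perm scoville :=
    PySem.List.sorted_perm scoville (fun x => x) false
  exact pvLoop_eq (pvHeapify scoville).length (pvHeapify scoville)
    (PySem.List.sorted scoville (fun x => x)) K 0 rfl hh hsorted (hperm.trans hsp.symm)
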